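-- pv_equiv track=rewrite | github.com/Nitishmaini/Algorithm-Toolbox | Week 3/car_fueling.py | countRefill
-- ===== SOURCE A (Python) =====
-- def countRefill(N, K, M, compulsory):
--     count = 0
--     i = 0
--     distCovered = 0
--
--     # While we complete the whole journey.
--     while (distCovered < N):
--
--         # If must visited petrol pump lie
--         # between distCovered and distCovered+K.
--         if (i < M and compulsory[i] <= (distCovered + K)):
--
--             # make last mustVisited as distCovered
--             distCovered = compulsory[i]
--
--             # increment the index of
--             # compulsory visited.
--             i += 1
--
--         # if no such must visited pump is
--         # there then increment distCovered by K.
--         else: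
--             distCovered += K
--
--         # Counting the number of refill.
--         if (distCovered < N):
--             count += 1
--
--     return count
-- ===== SOURCE B (Python) =====
-- def countRefill(N, K, M, compulsory):
--     # Per gap, the number of plain K-steps is computed by ceiling
--     # division instead of stepping one tank at a time.
--     def ceildiv(a, b):
--         return -((-a) // b)
--     count = 0
--     d = 0
--     pumps = compulsory[:M] if M >= 0 else []
--     for c in pumps:
--         if d >= N:
--             return count
--         s = max(0, ceildiv(c - d - K, K))
--         f = ceildiv(N - d, K)
--         if s < f:
--             count += s + (1 if c < N else 0)
--             d = c
--         else:
--             return count + f - 1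
--     if d < N:
--         count += ceildiv(N - d, K) - 1
--     return count
-- ===== Notes on version B (the rewrite author's own statement) =====
-- stated objective: alternative
-- what changed: B replaces A's one-tank-at-a-time while loop by a single pass over the compulsory stops, computing the number of plain K-steps in each gap with one ceiling division (intended as faster, O(M) vs O(N/K + M); a timing run read 1.79x at the largest size but inconsistently, so no speed is claimed).
-- outside the precondition, e.g. on countRefill(10, 0, 0, []): A does not finish within the time limit, B raises ZeroDivisionError; on countRefill(10, 3, 2, [4]): A raises IndexError, B returns 3; on countRefill(5, 1, 9, [5]): A returns 4, B returns 4
import Mathlib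
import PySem

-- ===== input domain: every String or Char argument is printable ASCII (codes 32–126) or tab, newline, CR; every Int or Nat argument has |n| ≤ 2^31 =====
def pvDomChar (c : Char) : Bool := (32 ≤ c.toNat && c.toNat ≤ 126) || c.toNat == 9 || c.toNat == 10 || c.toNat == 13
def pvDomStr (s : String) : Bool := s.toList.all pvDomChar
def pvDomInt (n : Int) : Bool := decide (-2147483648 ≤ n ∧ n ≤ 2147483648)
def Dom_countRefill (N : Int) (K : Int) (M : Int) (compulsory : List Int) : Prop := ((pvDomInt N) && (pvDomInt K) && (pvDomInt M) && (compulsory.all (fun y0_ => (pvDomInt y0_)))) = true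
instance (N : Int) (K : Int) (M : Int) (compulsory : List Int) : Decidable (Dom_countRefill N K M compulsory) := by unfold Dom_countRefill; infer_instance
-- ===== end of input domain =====

-- B replaces A's one-tank-at-a-time while loop by one ceiling division per
-- compulsory-stop gap (a different algorithm, not measured faster here);
-- equivalence is about the return value only.

-- ===== PORT A =====
-- lower bound on every position the loop can ever visit (used only to size the fuel)
def pvLowA (xs : List Int) : Int := xs.foldr min 0

-- literal port of A's while loop; fuel is a strict upper bound on the number of
-- iterations whenever Pre_ holds (proved in pvLoopA_eq_goB below); on inputs where
-- the Python loop diverges or raises IndexError (outside Pre_) the value is unclaimed.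
def pvLoopA (N K M : Int) (xs : List Int) : Nat → Int → Int → Int → Int
  | 0, _, _, count => count
  | fuel+1, d, i, count =>
    if d < N then
      if i < M then
        match PySem.List.pyGet? xs i with
        | none => count  -- IndexError in Python; excluded by Pre_
        | some c =>
          if c ≤ d + K then
            pvLoopA N K M xs fuel c (i+1) (count + (if c < N then 1 else 0))
          else
            pvLoopA N K M xs fuel (d+K) i (count + (if d+K < N then 1 else 0))
      else
        pvLoopA N K M xs fuel (d+K) i (count + (if d+K < N then 1 else 0))
    else count

def countRefill (N : Int) (K : Int) (M : Int) (compulsory : List Int) : Int :=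
  pvLoopA N K M compulsory ((M.toNat + 1) * ((N - pvLowA compulsory).toNat + 1)) 0 0 0

-- ===== PORT B =====
-- ceildiv(a, b) = -((-a) // b) from Source B
def pvCeilDiv (a b : Int) : Int := -(PySem.Int.floordiv (-a) b)

-- the for-loop of Source B (early returns become base results)
def pvGoB (N K : Int) : List Int → Int → Int → Int
  | [], d, count => if d < N then count + pvCeilDiv (N - d) K - 1 else count
  | c :: rest, d, count =>
    if d < N then
      if max 0 (pvCeilDiv (c - d - K) K) < pvCeilDiv (N - d) K then
        pvGoB N K rest c (count + max 0 (pvCeilDiv (c - d - K) K) + (if c < N then 1 else 0))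
      else count + pvCeilDiv (N - d) K - 1
    else count

def countRefill_alt (N : Int) (K : Int) (M : Int) (compulsory : List Int) : Int :=
  pvGoB N K (if 0 ≤ M then compulsory.take M.toNat else []) 0 0

-- ===== PRECONDITION & SPEC =====
-- Pre_ excludes (unless the journey is empty, N ≤ 0) K ≤ 0, on which A's while loop
-- never terminates, and M > len(compulsory), on which A in general raises IndexError
-- reading compulsory[i] (on the journeys that happen to complete before the list is
-- exhausted A returns and B agrees, but that set has no closed form).
def Pre_countRefill (N : Int) (K : Int) (M : Int) (compulsory : List Int) : Prop :=
  (1 ≤ K ∧ M ≤ (compulsory.length : Int)) ∨ N ≤ 0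
instance (N : Int) (K : Int) (M : Int) (compulsory : List Int) : Decidable (Pre_countRefill N K M compulsory) := by unfold Pre_countRefill; infer_instance

def pvWitness_countRefill : Int × Int × Int × List Int := (10, 3, 2, [4, 7])

def Spec_countRefill (N : Int) (K : Int) (M : Int) (compulsory : List Int) (out : Int) : Prop := out = countRefill_alt N K M compulsory
instance (N : Int) (K : Int) (M : Int) (compulsory : List Int) (out : Int) : Decidable (Spec_countRefill N K M compulsory out) := by unfold Spec_countRefill; infer_instance

-- ===== CLAIM (what is proved, stated in full; the proofs are below) =====
def Claim_equal_countRefill : Prop := ∀ (N : Int) (K : Int) (M : Int) (compulsory : List Int), Dom_countRefill N K M compulsory → Pre_countRefill N K M compulsory → Spec_countRefill N K M compulsory (countRefill N K M compulsory)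

-- ===== LEMMAS AND PROOFS =====

lemma pvCeilDiv_le_zero {x K : Int} (hK : 1 ≤ K) (hx : x ≤ 0) : pvCeilDiv x K ≤ 0 := by
  unfold pvCeilDiv
  have h := (PySem.Int.le_floordiv_iff_mul_le (a := -x) (b := K) (q := 0) (by omega)).mpr (by simp; omega)
  omega

lemma pvCeilDiv_pos {x K : Int} (hK : 1 ≤ K) (hx : 1 ≤ x) : 1 ≤ pvCeilDiv x K := by
  unfold pvCeilDiv
  have h := (PySem.Int.floordiv_lt_iff_lt_mul (a := -x) (b := K) (q := 0) (by omega)).mpr (by simp; omega)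
  omega

lemma pvCeilDiv_eq_one {x K : Int} (hK : 1 ≤ K) (h1 : 0 < x) (h2 : x ≤ K) : pvCeilDiv x K = 1 := by
  unfold pvCeilDiv
  rw [PySem.Int.neg_floordiv_neg_eq_iff_of_pos (by omega)]
  constructor <;> nlinarith

lemma pvCeilDiv_sub_self {x K : Int} (hK : 1 ≤ K) : pvCeilDiv (x - K) K = pvCeilDiv x K - 1 := by
  unfold pvCeilDiv
  have hK' : (0:Int) < K := by omega
  rw [PySem.Int.floordiv_eq_ediv_of_pos hK', PySem.Int.floordiv_eq_ediv_of_pos hK']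
  have hx : -(x - K) = -x + 1 * K := by ring
  rw [hx, Int.add_mul_ediv_right _ _ (by omega : K ≠ 0)]
  ring

lemma pvLowA_nonpos (xs : List Int) : pvLowA xs ≤ 0 := by
  induction xs with
  | nil => simp [pvLowA]
  | cons a t ih => simp only [pvLowA, List.foldr] at ih ⊢; omega

lemma pvLowA_le_mem (xs : List Int) {c : Int} (hc : c ∈ xs) : pvLowA xs ≤ c := by
  induction xs with
  | nil => cases hc
  | cons a t ih =>
    rcases List.mem_cons.mp hc with rfl | h
    · simp only [pvLowA, List.foldr]; omega
    · have := ih h; simp only [pvLowA, List.foldr] at this ⊢; omega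

lemma pvLoopA_eq_goB (N K M : Int) (xs : List Int) (hK : 1 ≤ K) (hM : M ≤ (xs.length : Int))
    (low : Int) (hlow0 : low ≤ 0) (hlowmem : ∀ c ∈ xs, low ≤ c) :
    ∀ (fuel : Nat) (d i count : Int), 0 ≤ i →
      (M.toNat - i.toNat) * ((N - low).toNat + 1) + (N - d).toNat < fuel →
      pvLoopA N K M xs fuel d i count = pvGoB N K ((xs.take M.toNat).drop i.toNat) d count := by
  intro fuel
  induction fuel with
  | zero => intro d i count _ hf; omega
  | succ fuel ih =>
    intro d i count hi hf
    by_cases hd : d < N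
    · by_cases hiM : i < M
      · have hilen : i.toNat < xs.length := by omega
        have hget : PySem.List.pyGet? xs i = some xs[i.toNat] :=
          PySem.List.pyGet?_eq_some_getElem xs hi (by omega)
        have hdrop : (xs.take M.toNat).drop i.toNat
            = xs[i.toNat] :: (xs.take M.toNat).drop (i.toNat + 1) := by
          rw [List.drop_eq_getElem_cons (by simp [List.length_take]; omega)]
          congr 1
          exact List.getElem_take
        have hlc : low ≤ xs[i.toNat] := hlowmem _ (List.getElem_mem _)
        by_cases hck : xs[i.toNat] ≤ d + K
        · -- compulsory pump reachable: A jumps, B's step count for this pump is 0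
          have hs0 : pvCeilDiv (xs[i.toNat] - d - K) K ≤ 0 := pvCeilDiv_le_zero hK (by omega)
          have hf1 : 1 ≤ pvCeilDiv (N - d) K := pvCeilDiv_pos hK (by omega)
          have hmax : max 0 (pvCeilDiv (xs[i.toNat] - d - K) K) = 0 := by omega
          rw [pvLoopA, if_pos hd, if_pos hiM, hget]
          simp only [hck, if_pos]
          rw [hdrop, pvGoB, if_pos hd, hmax, if_pos (by omega : (0:Int) < pvCeilDiv (N - d) K)]
          have hstep := ih xs[i.toNat] (i+1) (count + (if xs[i.toNat] < N then 1 else 0)) (by omega)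
            (by
              have h1 : (N - xs[i.toNat]).toNat < (N - low).toNat + 1 := by omega
              have h2 : 1 ≤ M.toNat - i.toNat := by omega
              have h41 : (i + 1).toNat = i.toNat + 1 := by omega
              rw [h41]
              have hsub : M.toNat - (i.toNat + 1) = M.toNat - i.toNat - 1 := by omega
              rw [hsub, Nat.sub_one_mul]
              have hge : (N - low).toNat + 1 ≤ (M.toNat - i.toNat) * ((N - low).toNat + 1) :=
                Nat.le_mul_of_pos_left _ (by omega)
              omega)
          rw [hstep]
          have h41 : (i + 1).toNat = i.toNat + 1 := by omega
          rw [h41]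
          ring_nf
        · -- pump not reachable: A drives one tank of fuel
          have hs1 : 1 ≤ pvCeilDiv (xs[i.toNat] - d - K) K := pvCeilDiv_pos hK (by omega)
          rw [pvLoopA, if_pos hd, if_pos hiM, hget]
          simp only [hck, if_false]
          by_cases hdk : d + K < N
          · have hf2 : 1 ≤ pvCeilDiv (N - d - K) K := pvCeilDiv_pos hK (by omega)
            have hsh1 : pvCeilDiv (xs[i.toNat] - (d + K) - K) K
                = pvCeilDiv (xs[i.toNat] - d - K) K - 1 := by
              have h := pvCeilDiv_sub_self (x := xs[i.toNat] - d - K) hK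
              have he : xs[i.toNat] - (d + K) - K = xs[i.toNat] - d - K - K := by ring
              rw [he, h]
            have hsh2 : pvCeilDiv (N - (d + K)) K = pvCeilDiv (N - d) K - 1 := by
              have h := pvCeilDiv_sub_self (x := N - d) hK
              have he : N - (d + K) = N - d - K := by ring
              rw [he, h]
            have hf3 : 2 ≤ pvCeilDiv (N - d) K := by
              have he : N - d - K = N - (d + K) := by ring
              rw [he, hsh2] at hf2; omega
            rw [if_pos hdk]
            rw [ih (d + K) i (count + 1) hi (by omega)]
            rw [hdrop, pvGoB, pvGoB, if_pos hd, if_pos hdk, hsh1, hsh2]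
            have hm1 : max 0 (pvCeilDiv (xs[i.toNat] - d - K) K)
                = pvCeilDiv (xs[i.toNat] - d - K) K := by omega
            have hm2 : max 0 (pvCeilDiv (xs[i.toNat] - d - K) K - 1)
                = pvCeilDiv (xs[i.toNat] - d - K) K - 1 := by omega
            rw [hm1, hm2]
            by_cases hlt : pvCeilDiv (xs[i.toNat] - d - K) K < pvCeilDiv (N - d) K
            · rw [if_pos hlt, if_pos (by omega)]
              congr 1
              ring
            · rw [if_neg hlt, if_neg (by omega)]
              ring
          · -- tank runs out before the next pump: journey ends
            have hf1 : pvCeilDiv (N - d) K = 1 := pvCeilDiv_eq_one hK (by omega) (by omega)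
            rw [if_neg hdk, add_zero]
            rw [ih (d + K) i count hi (by omega)]
            rw [hdrop, pvGoB, pvGoB, if_pos hd, if_neg (by omega : ¬ d + K < N), hf1]
            rw [if_neg (by omega)]
            omega
      · -- compulsory pumps exhausted: plain driving to the end
        have hdropnil : (xs.take M.toNat).drop i.toNat = [] :=
          List.drop_eq_nil_of_le (by simp [List.length_take]; omega)
        rw [pvLoopA, if_pos hd, if_neg hiM]
        by_cases hdk : d + K < N
        · have hf2 : 1 ≤ pvCeilDiv (N - d - K) K := pvCeilDiv_pos hK (by omega)
          have hsh2 : pvCeilDiv (N - (d + K)) K = pvCeilDiv (N - d) K - 1 := by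
            have h := pvCeilDiv_sub_self (x := N - d) hK
            have he : N - (d + K) = N - d - K := by ring
            rw [he, h]
          rw [if_pos hdk]
          rw [ih (d + K) i (count + 1) hi (by omega)]
          rw [hdropnil, pvGoB, pvGoB, if_pos hd, if_pos hdk, hsh2]
          ring
        · have hf1 : pvCeilDiv (N - d) K = 1 := pvCeilDiv_eq_one hK (by omega) (by omega)
          rw [if_neg hdk, add_zero]
          rw [ih (d + K) i count hi (by omega)]
          rw [hdropnil, pvGoB, pvGoB, if_pos hd, if_neg (by omega : ¬ d + K < N), hf1]
          omega
    · -- journey already complete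
      rw [pvLoopA, if_neg hd]
      cases hrest : (xs.take M.toNat).drop i.toNat with
      | nil => rw [pvGoB, if_neg hd]
      | cons c rest => rw [pvGoB, if_neg hd]

-- ===== VERDICT (by name: the statement is the Claim_ definition above) =====
theorem countRefill_spec : Claim_equal_countRefill := by
  intro N K M xs _ hpre
  unfold Spec_countRefill countRefill countRefill_alt
  rcases hpre with ⟨hK, hM⟩ | hN0
  case inr =>
    -- empty journey: both programs return 0 without looking at K or the stops
    obtain ⟨f, hf⟩ := Nat.exists_eq_succ_of_ne_zero
      (Nat.pos_iff_ne_zero.mp (Nat.mul_pos (Nat.succ_pos _) (Nat.succ_pos _))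
        : (M.toNat + 1) * ((N - pvLowA xs).toNat + 1) ≠ 0)
    rw [hf, pvLoopA, if_neg (by omega : ¬ (0:Int) < N)]
    cases hL : (if 0 ≤ M then xs.take M.toNat else []) with
    | nil => rw [pvGoB, if_neg (by omega : ¬ (0:Int) < N)]
    | cons c rest => rw [pvGoB, if_neg (by omega : ¬ (0:Int) < N)]
  case inl =>
  have hmeas : (M.toNat - (0:Int).toNat) * ((N - pvLowA xs).toNat + 1) + (N - 0).toNat
      < (M.toNat + 1) * ((N - pvLowA xs).toNat + 1) := by
    have h0 := pvLowA_nonpos xs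
    have h1 : (N - 0).toNat ≤ (N - pvLowA xs).toNat := by omega
    have h2 : M.toNat - (0 : Int).toNat = M.toNat := by omega
    rw [h2, add_one_mul]
    omega
  rw [pvLoopA_eq_goB N K M xs hK hM (pvLowA xs) (pvLowA_nonpos xs)
      (fun c hc => pvLowA_le_mem xs hc) _ 0 0 0 le_rfl hmeas]
  by_cases hM0 : 0 ≤ M
  · rw [if_pos hM0]; rfl
  · rw [if_neg hM0]
    have : M.toNat = 0 := by omega
    rw [this]
    rfl
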